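-- pv_equiv track=rewrite | github.com/koba925/alds | atcoder/TYPICAL90/BX.py | cakecut_editorial
-- ===== SOURCE A (Python) =====
-- import itertools as it
-- from bisect import bisect_left
--
-- def cakecut_editorial(N, A):
--     total = sum(A)
--     if total % 10 != 0:
--         return False
--
--     A += A
--     B = [0] + list(it.accumulate(A))
--     for left in range(N):
--         target = total // 10 + B[left]
--         right = bisect_left(B, target, left)
--         if B[right] == target:
--             return True
--     return False
-- ===== SOURCE B (Python) =====
-- # Two-pointer sliding window over the monotone prefix sums: the right pointer only
-- # ever advances, so there is no per-start search and no lookup structure at all.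
-- # Note: A mutates its argument (A += A); B does not -- the equivalence claimed is
-- # about the return value only.
-- def cakecut_editorial(N, A):
--     total = sum(A)
--     if total % 10 != 0:
--         return False
--     tenth = total // 10
--     AA = A + A
--     m = len(AA)
--     right = 0
--     rsum = 0   # prefix sum of AA[:right]
--     lsum = 0   # prefix sum of A[:left]
--     for left in range(N):
--         target = lsum + tenth
--         while right < m and rsum < target:
--             rsum += AA[right]
--             right += 1
--         if rsum == target:
--             return True
--         lsum += A[left]
--     return False
-- ===== Notes on version B (the rewrite author's own statement) =====
-- stated objective: alternative
-- what changed: Replaced the per-start binary search (bisect_left on the prefix-sum array) by a single two-pointer sliding window over the monotone prefix sums: one right pointer that only ever advances, no search and no lookup structure.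
-- outside the precondition, e.g. on cakecut_editorial(6, [-9, -12, 7, 9, 3, 12]): A returns True, B returns False; on cakecut_editorial(1, [-10]): A raises IndexError, B returns False; on cakecut_editorial(3, [5, 5]): A returns False, B raises IndexError
import Mathlib
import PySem

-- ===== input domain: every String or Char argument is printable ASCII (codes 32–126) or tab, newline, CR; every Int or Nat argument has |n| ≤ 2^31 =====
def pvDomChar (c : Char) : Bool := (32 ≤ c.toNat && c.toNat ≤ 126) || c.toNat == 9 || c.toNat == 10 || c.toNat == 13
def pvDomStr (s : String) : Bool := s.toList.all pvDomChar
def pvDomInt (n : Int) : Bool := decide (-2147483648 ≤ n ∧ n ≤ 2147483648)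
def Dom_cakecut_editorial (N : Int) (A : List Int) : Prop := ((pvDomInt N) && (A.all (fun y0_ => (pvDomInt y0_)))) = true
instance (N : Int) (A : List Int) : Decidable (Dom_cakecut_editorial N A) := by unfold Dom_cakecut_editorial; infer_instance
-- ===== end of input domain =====

-- B replaces the per-start binary search by one two-pointer sliding window over the
-- monotone prefix sums (the right pointer only ever advances; no search structure).
-- Python A mutates its argument (A += A), B does not; the claim is about the return value only.

-- ===== PORT A =====

-- itertools.accumulate: running sums starting from acc
def pvAccum : Int → List Int → List Int
  | _, [] => []
  | acc, x :: xs => (acc + x) :: pvAccum (acc + x) xs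

-- bisect.bisect_left(a, x, lo) with hi = len(a), transliterated (a[mid] read via getD; in range whenever hi ≤ len a)
def pvBisect (a : List Int) (x : Int) (lo hi : Nat) : Nat :=
  if lo < hi then
    let mid := (lo + hi) / 2
    if a.getD mid 0 < x then pvBisect a x (mid + 1) hi else pvBisect a x lo mid
  else lo
termination_by hi - lo
decreasing_by all_goals omega

def cakecut_editorial (N : Int) (A : List Int) : Bool :=
  let total := A.sum
  if PySem.Int.mod total 10 ≠ 0 then false
  else
    let AA := A ++ A
    let B := 0 :: pvAccum 0 AA
    (PySem.List.pyRange 0 N 1).any fun left =>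
      match PySem.List.pyGet? B left with
      | none => false   -- Python: IndexError (excluded by Pre_)
      | some bl =>
        let target := PySem.Int.floordiv total 10 + bl
        let right := pvBisect B target left.toNat B.length
        match B[right]? with
        | none => false  -- Python: IndexError (excluded by Pre_)
        | some v => v == target

-- ===== PORT B =====

-- the inner `while right < m and rsum < target` loop of Source B
def pvWhile (AA : List Int) (target : Int) (right : Nat) (rsum : Int) : Nat × Int :=
  if _h : right < AA.length ∧ rsum < target then
    pvWhile AA target (right + 1) (rsum + AA.getD right 0)
  else (right, rsum)
termination_by AA.length - right
decreasing_by omega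

-- the outer `for left in range(N)` loop of Source B, carrying lsum and the sliding (right, rsum)
def pvTP (A AA : List Int) (tenth : Int) : Nat → Int → Int → Nat → Int → Bool
  | 0, _, _, _, _ => false
  | fuel + 1, left, lsum, right, rsum =>
    let target := lsum + tenth
    let p := pvWhile AA target right rsum
    if p.2 == target then true
    else
      match PySem.List.pyGet? A left with
      | none => false  -- Python: IndexError (excluded by Pre_)
      | some x => pvTP A AA tenth fuel (left + 1) (lsum + x) p.1 p.2

def cakecut_editorial_alt (N : Int) (A : List Int) : Bool :=
  let total := A.sum
  if PySem.Int.mod total 10 ≠ 0 then false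
  else
    let tenth := PySem.Int.floordiv total 10
    let AA := A ++ A
    pvTP A AA tenth N.toNat 0 0 0 0

-- ===== PRECONDITION & SPEC =====

-- Pre_ excludes only inputs whose total IS divisible by 10 but which have a negative element or
-- N > len(A): there A bisects an UNSORTED prefix-sum array / reads prefix sums past position N,
-- raising IndexError or returning an accidental value (and B raises for N > len(A)).
def Pre_cakecut_editorial (N : Int) (A : List Int) : Prop :=
  PySem.Int.mod A.sum 10 ≠ 0 ∨ (N ≤ A.length ∧ ∀ x ∈ A, 0 ≤ x)

instance (N : Int) (A : List Int) : Decidable (Pre_cakecut_editorial N A) := by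
  unfold Pre_cakecut_editorial; infer_instance

def pvWitness_cakecut_editorial : Int × List Int := (4, [1, 2, 3, 4])

def Spec_cakecut_editorial (N : Int) (A : List Int) (out : Bool) : Prop := out = cakecut_editorial_alt N A
instance (N : Int) (A : List Int) (out : Bool) : Decidable (Spec_cakecut_editorial N A out) := by unfold Spec_cakecut_editorial; infer_instance

-- ===== CLAIM (what is proved, stated in full; the proofs are below) =====
def Claim_equal_cakecut_editorial : Prop := ∀ (N : Int) (A : List Int), Dom_cakecut_editorial N A → Pre_cakecut_editorial N A → Spec_cakecut_editorial N A (cakecut_editorial N A)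

-- ===== LEMMAS AND PROOFS =====

theorem pvAccum_length (a : Int) (xs : List Int) : (pvAccum a xs).length = xs.length := by
  induction xs generalizing a with
  | nil => rfl
  | cons x xs ih => simp [pvAccum, ih]

theorem pvAccum_getElem? (xs : List Int) (a : Int) (i : Nat) (h : i < xs.length) :
    (pvAccum a xs)[i]? = some (a + (xs.take (i + 1)).sum) := by
  induction xs generalizing a i with
  | nil => simp at h
  | cons x xs ih =>
    cases i with
    | zero => simp [pvAccum]
    | succ j =>
      simp only [pvAccum, List.getElem?_cons_succ]
      rw [ih (a + x) j (by simpa using h)]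
      simp [List.sum_cons]; ring

theorem take_sum_step (L : List Int) (h : ∀ x ∈ L, 0 ≤ x) (i : Nat) :
    (L.take i).sum ≤ (L.take (i + 1)).sum := by
  rw [List.take_add_one, List.sum_append]
  have h0 : 0 ≤ (L[i]?.toList).sum := by
    cases hg : L[i]? with
    | none => simp
    | some v => simpa using h v (List.mem_of_getElem? hg)
  omega

theorem take_sum_mono (L : List Int) (h : ∀ x ∈ L, 0 ≤ x) :
    ∀ i j : Nat, i ≤ j → (L.take i).sum ≤ (L.take j).sum :=
  fun _ _ hij => monotone_nat_of_le_succ (take_sum_step L h) hij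

theorem pvB_length (L : List Int) : (0 :: pvAccum 0 L).length = L.length + 1 := by
  simp [pvAccum_length]

theorem pvB_getElem? (L : List Int) (i : Nat) (h : i < L.length + 1) :
    (0 :: pvAccum 0 L)[i]? = some ((L.take i).sum) := by
  cases i with
  | zero => simp
  | succ j =>
    simp only [List.getElem?_cons_succ]
    rw [pvAccum_getElem? L 0 j (by omega)]
    simp

theorem pvB_getD (L : List Int) (i : Nat) (h : i < L.length + 1) :
    (0 :: pvAccum 0 L).getD i 0 = (L.take i).sum := by
  rw [List.getD_eq_getElem?_getD, pvB_getElem? L i h]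
  rfl

theorem pvB_mono (L : List Int) (h : ∀ x ∈ L, 0 ≤ x) :
    ∀ i j : Nat, i ≤ j → j < (0 :: pvAccum 0 L).length →
      (0 :: pvAccum 0 L).getD i 0 ≤ (0 :: pvAccum 0 L).getD j 0 := by
  intro i j hij hj
  rw [pvB_length] at hj
  rw [pvB_getD L i (by omega), pvB_getD L j (by omega)]
  exact take_sum_mono L h i j hij

theorem pvB_step (L : List Int) (i : Nat) (h : i < L.length) :
    (0 :: pvAccum 0 L).getD (i + 1) 0 = (0 :: pvAccum 0 L).getD i 0 + L.getD i 0 := by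
  rw [pvB_getD L (i + 1) (by omega), pvB_getD L i (by omega)]
  rw [List.take_add_one, List.sum_append, List.getElem?_eq_getElem h,
      List.getD_eq_getElem?_getD, List.getElem?_eq_getElem h]
  simp

theorem pvBisect_spec (a : List Int) (x : Int)
    (mono : ∀ i j : Nat, i ≤ j → j < a.length → a.getD i 0 ≤ a.getD j 0) :
    ∀ (m lo hi : Nat), hi - lo = m → lo ≤ hi → hi ≤ a.length →
      lo ≤ pvBisect a x lo hi ∧ pvBisect a x lo hi ≤ hi ∧
      (∀ i, lo ≤ i → i < pvBisect a x lo hi → a.getD i 0 < x) ∧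
      (∀ i, pvBisect a x lo hi ≤ i → i < hi → x ≤ a.getD i 0) := by
  intro m
  induction m using Nat.strong_induction_on with
  | _ m ih =>
    intro lo hi hm hlohi hha
    rw [pvBisect]
    by_cases hlt : lo < hi
    · simp only [hlt, if_true]
      by_cases hc : a.getD ((lo + hi) / 2) 0 < x
      · simp only [hc, if_true]
        have hrec := ih (hi - ((lo + hi) / 2 + 1)) (by omega) ((lo + hi) / 2 + 1) hi rfl
          (by omega) hha
        refine ⟨by omega, hrec.2.1, ?_, hrec.2.2.2⟩
        intro i hi1 hi2
        by_cases hile : i ≤ (lo + hi) / 2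
        · exact lt_of_le_of_lt (mono i ((lo + hi) / 2) hile (by omega)) hc
        · exact hrec.2.2.1 i (by omega) hi2
      · simp only [hc, if_false]
        have hrec := ih ((lo + hi) / 2 - lo) (by omega) lo ((lo + hi) / 2) rfl
          (by omega) (by omega)
        refine ⟨hrec.1, by omega, hrec.2.2.1, ?_⟩
        intro i hi1 hi2
        by_cases hile : (lo + hi) / 2 ≤ i
        · exact le_trans (not_lt.mp hc) (mono ((lo + hi) / 2) i hile (by omega))
        · exact hrec.2.2.2 i hi1 (by omega)
    · simp only [hlt, if_false]
      exact ⟨le_refl _, hlohi, by intro i h1 h2; omega, by intro i h1 h2; omega⟩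

theorem pvBisect_hit (a : List Int) (x : Int)
    (mono : ∀ i j : Nat, i ≤ j → j < a.length → a.getD i 0 ≤ a.getD j 0)
    (lo : Nat) (hlo : lo ≤ a.length) :
    (match a[pvBisect a x lo a.length]? with
     | none => false
     | some v => v == x) = true ↔
      ∃ i, lo ≤ i ∧ i < a.length ∧ a.getD i 0 = x := by
  obtain ⟨h1, h2, h3, h4⟩ := pvBisect_spec a x mono (a.length - lo) lo a.length rfl hlo le_rfl
  constructor
  · intro h
    cases hg : a[pvBisect a x lo a.length]? with
    | none => rw [hg] at h; simp at h
    | some v =>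
      rw [hg] at h
      simp only [beq_iff_eq] at h
      have hrlen : pvBisect a x lo a.length < a.length := by
        by_contra hcon
        rw [List.getElem?_eq_none_iff.mpr (by omega)] at hg
        simp at hg
      refine ⟨pvBisect a x lo a.length, h1, hrlen, ?_⟩
      rw [List.getD_eq_getElem?_getD, hg]
      simpa using h
  · rintro ⟨i, hli, hilen, hix⟩
    have hir : pvBisect a x lo a.length ≤ i := by
      by_contra hcon
      exact absurd hix (ne_of_lt (h3 i hli (by omega)))
    have hrlen : pvBisect a x lo a.length < a.length := lt_of_le_of_lt hir hilen
    have hrx : a.getD (pvBisect a x lo a.length) 0 = x := by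
      have hle := mono (pvBisect a x lo a.length) i hir hilen
      rw [hix] at hle
      exact le_antisymm hle (h4 _ le_rfl hrlen)
    rw [List.getElem?_eq_getElem hrlen]
    simp only [beq_iff_eq]
    rw [List.getD_eq_getElem?_getD, List.getElem?_eq_getElem hrlen] at hrx
    simpa using hrx

theorem exists_ge_iff (a : List Int) (tenth : Int) (ht : 0 ≤ tenth)
    (mono : ∀ i j : Nat, i ≤ j → j < a.length → a.getD i 0 ≤ a.getD j 0)
    (lo : Nat) (hlo : lo < a.length) :
    (∃ i, lo ≤ i ∧ i < a.length ∧ a.getD i 0 = tenth + a.getD lo 0) ↔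
      ∃ i, i < a.length ∧ a.getD i 0 = tenth + a.getD lo 0 := by
  constructor
  · rintro ⟨i, _, hilen, hix⟩; exact ⟨i, hilen, hix⟩
  · rintro ⟨i, hilen, hix⟩
    by_cases hli : lo ≤ i
    · exact ⟨i, hli, hilen, hix⟩
    · have h1 : a.getD i 0 ≤ a.getD lo 0 := mono i lo (by omega) hlo
      have h2 : tenth = 0 := by omega
      exact ⟨lo, le_refl _, hlo, by omega⟩

theorem any_congr' {α : Type} (l : List α) (p q : α → Bool) (h : ∀ a ∈ l, p a = q a) :
    l.any p = l.any q := by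
  induction l with
  | nil => rfl
  | cons x xs ih =>
    simp only [List.any_cons, h x (List.mem_cons_self), ih (fun a ha => h a (List.mem_cons_of_mem x ha))]

-- the inner while loop lands on the first prefix sum ≥ target at or after `right`
theorem pvWhile_spec (AA : List Int) (target : Int) :
    ∀ (fuel right : Nat) (rsum : Int), AA.length - right = fuel →
      right ≤ AA.length → rsum = (0 :: pvAccum 0 AA).getD right 0 →
      right ≤ (pvWhile AA target right rsum).1 ∧
      (pvWhile AA target right rsum).1 ≤ AA.length ∧
      (pvWhile AA target right rsum).2 = (0 :: pvAccum 0 AA).getD (pvWhile AA target right rsum).1 0 ∧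
      (∀ i, right ≤ i → i < (pvWhile AA target right rsum).1 → (0 :: pvAccum 0 AA).getD i 0 < target) ∧
      ((pvWhile AA target right rsum).1 = AA.length ∨ target ≤ (pvWhile AA target right rsum).2) := by
  intro fuel
  induction fuel using Nat.strong_induction_on with
  | _ fuel ih =>
    intro right rsum hf hr hs
    rw [pvWhile]
    by_cases hg : right < AA.length ∧ rsum < target
    · rw [dif_pos hg]
      have hstep : rsum + AA.getD right 0 = (0 :: pvAccum 0 AA).getD (right + 1) 0 := by
        rw [pvB_step AA right hg.1, hs]
      have hrec := ih (AA.length - (right + 1)) (by omega) (right + 1)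
        (rsum + AA.getD right 0) rfl (by omega) hstep
      refine ⟨by have := hrec.1; omega, hrec.2.1, hrec.2.2.1, ?_, hrec.2.2.2.2⟩
      intro i hi1 hi2
      by_cases hie : i = right
      · subst hie; rw [← hs]; exact hg.2
      · exact hrec.2.2.2.1 i (by omega) hi2
    · rw [dif_neg hg]
      refine ⟨le_refl _, hr, hs, by intro i h1 h2; omega, ?_⟩
      rcases not_and_or.mp hg with h | h
      · exact Or.inl (by omega)
      · exact Or.inr (by omega)

-- one iteration of B's outer loop decides the same membership question as A's bisect step
theorem pvTP_eq (A : List Int) (hpos : ∀ x ∈ A, 0 ≤ x) (tenth : Int) (ht : 0 ≤ tenth) :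
    ∀ (fuel l right : Nat) (rsum : Int), l + fuel ≤ A.length → right ≤ (A ++ A).length →
      rsum = (0 :: pvAccum 0 (A ++ A)).getD right 0 →
      (∀ i, l ≤ i → i < right →
        (0 :: pvAccum 0 (A ++ A)).getD i 0 < (A.take l).sum + tenth) →
      pvTP A (A ++ A) tenth fuel (l : Int) ((A.take l).sum) right rsum =
        (List.range fuel).any (fun k =>
          decide (∃ i, i < (0 :: pvAccum 0 (A ++ A)).length ∧
            (0 :: pvAccum 0 (A ++ A)).getD i 0 = tenth + (A.take (l + k)).sum)) := by
  intro fuel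
  induction fuel with
  | zero => intro l right rsum _ _ _ _; rfl
  | succ f ihf =>
    intro l right rsum hl hr hs hinv
    have hposAA : ∀ x ∈ A ++ A, 0 ≤ x := by
      intro x hx; rcases List.mem_append.mp hx with h | h <;> exact hpos x h
    have mono := pvB_mono (A ++ A) hposAA
    have hlA : l < A.length := by omega
    have hBlen : (0 :: pvAccum 0 (A ++ A)).length = (A ++ A).length + 1 := pvB_length _
    have hAAlen : (A ++ A).length = A.length + A.length := by simp
    have htake : ((A ++ A).take l).sum = (A.take l).sum := by
      rw [List.take_append_of_le_length (by omega)]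
    have hgl : (0 :: pvAccum 0 (A ++ A)).getD l 0 = (A.take l).sum := by
      rw [pvB_getD (A ++ A) l (by omega), htake]
    rw [pvTP]
    set target := (A.take l).sum + tenth with hT
    obtain ⟨w1, w2, w3, w4, w5⟩ :=
      pvWhile_spec (A ++ A) target ((A ++ A).length - right) right rsum rfl hr hs
    set p := pvWhile (A ++ A) target right rsum with hp
    -- the combined "everything in [l, p.1) is below target" fact
    have hbelow : ∀ i, l ≤ i → i < p.1 → (0 :: pvAccum 0 (A ++ A)).getD i 0 < target := by
      intro i h1 h2
      by_cases hir : i < right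
      · exact hinv i h1 hir
      · exact w4 i (by omega) h2
    -- the test `p.2 == target` decides ∃ i < len B, B i = tenth + lsum
    have hdec : (p.2 == target) = true ↔
        (∃ i, i < (0 :: pvAccum 0 (A ++ A)).length ∧
          (0 :: pvAccum 0 (A ++ A)).getD i 0 = tenth + (A.take (l + 0)).sum) := by
      simp only [Nat.add_zero, beq_iff_eq]
      constructor
      · intro h
        exact ⟨p.1, by omega, by rw [← w3, h, hT]; ring⟩
      · rintro ⟨i, hilen, hie⟩
        have hie' : (0 :: pvAccum 0 (A ++ A)).getD i 0 = target := by rw [hie, hT]; ring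
        -- move the witness to some index ≥ l
        obtain ⟨j, hjl, hjlen, hje⟩ :
            ∃ j, l ≤ j ∧ j < (0 :: pvAccum 0 (A ++ A)).length ∧
              (0 :: pvAccum 0 (A ++ A)).getD j 0 = target := by
          by_cases hli : l ≤ i
          · exact ⟨i, hli, hilen, hie'⟩
          · have h1 : (0 :: pvAccum 0 (A ++ A)).getD i 0 ≤
                (0 :: pvAccum 0 (A ++ A)).getD l 0 := mono i l (by omega) (by omega)
            refine ⟨l, le_refl _, by omega, ?_⟩
            rw [hgl]; rw [hie', hgl] at h1; omega
        -- j cannot be in [l, p.1): those are < target; j cannot be > p.1 unless B p.1 > target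
        by_cases hjp : j < p.1
        · exact absurd hje (ne_of_lt (hbelow j hjl hjp))
        · rcases w5 with hend | hge
          · have hj : j = p.1 := by omega
            rw [w3, ← hj, hje]
          · have h1 : (0 :: pvAccum 0 (A ++ A)).getD p.1 0 ≤
                (0 :: pvAccum 0 (A ++ A)).getD j 0 := mono p.1 j (by omega) (by omega)
            rw [hje] at h1
            rw [w3] at hge ⊢
            omega
    by_cases hc : (p.2 == target) = true
    · simp only [hc, if_true]
      rw [List.range_succ_eq_map]
      simp only [List.any_cons]
      rw [eq_comm, Bool.or_eq_true, decide_eq_true_eq]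
      exact Or.inl (hdec.mp hc)
    · simp only [hc, Bool.false_eq_true, if_false]
      rw [PySem.List.pyGet?_natCast, List.getElem?_eq_getElem hlA]
      simp only []
      have hstep : (A.take l).sum + A[l] = (A.take (l + 1)).sum := by
        rw [List.take_add_one, List.sum_append, List.getElem?_eq_getElem hlA]
        simp
      have hcast : ((l : Int) + 1) = ((l + 1 : Nat) : Int) := by push_cast; ring
      rw [hcast, hstep]
      have hinv' : ∀ i, l + 1 ≤ i → i < p.1 →
          (0 :: pvAccum 0 (A ++ A)).getD i 0 < (A.take (l + 1)).sum + tenth := by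
        intro i h1 h2
        have := hbelow i (by omega) h2
        have hmono := take_sum_step A hpos l
        rw [hT] at this; omega
      rw [ihf (l + 1) p.1 p.2 (by omega) w2 w3 hinv']
      rw [List.range_succ_eq_map]
      simp only [List.any_cons, Nat.add_zero, List.any_map]
      have h0 : decide (∃ i, i < (0 :: pvAccum 0 (A ++ A)).length ∧
          (0 :: pvAccum 0 (A ++ A)).getD i 0 = tenth + (A.take (l + 0)).sum) = false := by
        rw [decide_eq_false_iff_not]
        intro hex
        exact hc (hdec.mpr (by simpa using hex))
      simp only [Nat.add_zero] at h0
      rw [h0]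
      simp only [Bool.false_or]
      apply any_congr'
      intro k _
      simp only [Function.comp]
      rw [show l + 1 + k = l + (k + 1) from by omega]

-- ===== VERDICT (by name: the statement is the Claim_ definition above) =====
theorem cakecut_editorial_spec : Claim_equal_cakecut_editorial := by
  intro N A _hdom hpre
  unfold Spec_cakecut_editorial cakecut_editorial cakecut_editorial_alt
  simp only []
  split_ifs with hmod
  · rfl
  · obtain ⟨hN, hpos⟩ := hpre.resolve_left hmod
    have hposAA : ∀ x ∈ A ++ A, 0 ≤ x := by
      intro x hx; rcases List.mem_append.mp hx with h | h <;> exact hpos x h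
    have htot : 0 ≤ A.sum := List.sum_nonneg hpos
    have htenth : 0 ≤ PySem.Int.floordiv A.sum 10 := by
      rw [PySem.Int.floordiv_eq_ediv_of_pos (by norm_num)]
      exact Int.ediv_nonneg htot (by norm_num)
    have hmono := pvB_mono (A ++ A) hposAA
    have hNle : N.toNat ≤ A.length := by omega
    have hBlen : (0 :: pvAccum 0 (A ++ A)).length = (A ++ A).length + 1 := pvB_length _
    have hAAlen : (A ++ A).length = A.length + A.length := by simp
    -- B side: the two-pointer loop as an any over range
    have hrhs := pvTP_eq A hpos (PySem.Int.floordiv A.sum 10) htenth N.toNat 0 0 0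
      (by omega) (by omega) (by simp) (by intro i h1 h2; omega)
    simp only [Nat.cast_zero, List.take_zero, List.sum_nil, Nat.zero_add] at hrhs
    rw [hrhs]
    -- A side: the any over pyRange
    rw [PySem.List.pyRange_one 0 N]
    simp only [Int.sub_zero, List.any_map]
    apply any_congr'
    intro k hk
    have hkN : k < N.toNat := List.mem_range.mp hk
    have hkA : k < A.length := by omega
    simp only [Function.comp, Int.zero_add]
    rw [PySem.List.pyGet?_natCast, pvB_getElem? (A ++ A) k (by omega)]
    simp only [Int.toNat_natCast]
    have htake : ((A ++ A).take k).sum = (A.take k).sum := by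
      rw [List.take_append_of_le_length (by omega)]
    rw [Bool.eq_iff_iff]
    rw [pvBisect_hit (0 :: pvAccum 0 (A ++ A))
        (PySem.Int.floordiv A.sum 10 + ((A ++ A).take k).sum) hmono k (by omega)]
    have hgd : (0 :: pvAccum 0 (A ++ A)).getD k 0 = ((A ++ A).take k).sum :=
      pvB_getD (A ++ A) k (by omega)
    rw [show (PySem.Int.floordiv A.sum 10 + ((A ++ A).take k).sum) =
          (PySem.Int.floordiv A.sum 10 + (0 :: pvAccum 0 (A ++ A)).getD k 0) by rw [hgd]]
    rw [exists_ge_iff (0 :: pvAccum 0 (A ++ A)) (PySem.Int.floordiv A.sum 10) htenth hmono k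
        (by omega)]
    rw [hgd, htake, decide_eq_true_eq]
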